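-- pv_equiv track=rewrite | github.com/akochergina/rna-folding | modules/rna_structure.py | alignment_edges
-- ===== SOURCE A (Python) =====
-- def alignment_edges(xp, yp):
--     """
--         Extract edges from alignment strings.
--         An edge is a pair of respective positions $i$ and $j$ in $x$ and $y$ that are in the same alignment column
--         (regardless whether matched or mismatched). The alignment should be givn as a pair of alignment strings.
--         Indexing sequence positions from 1 to the sequence length.
--         x' = ACGU--CGACUAGC-
--         y' = -CGUCGU-ACUCGCG
--         Edges of our example alignment are (2,1), (3,2), (4,3), (5,6), ..., (12,12).
--
--         Args:
--             xp: alignment string of sequence x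
--             yp: alignment string of sequence y
--
--         Returns:
--             List of edges in the alignment graph
--
--         Example:
--             alignment_edges("ACGT", "AC-T") == [(1,1), (2, 2), (4, 3)]
--     """
--     assert len(xp) == len(yp), "Sequences must have the same length"
--     edges = []
--     i, j = 0, 0
--     for k in range(len(xp)):
--         if xp[k] != '-' and yp[k] != '-':
--             i += 1
--             j += 1
--             edges.append((i, j))
--         elif xp[k] == '-':
--             j += 1
--         else:
--             i += 1
--     return edges
-- ===== SOURCE B (Python) =====
-- def alignment_edges(xp, yp):
--     assert len(xp) == len(yp), "Sequences must have the same length"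
--     # prefix tables: xi[k] = number of non-gap chars in xp[:k+1], yi[k] likewise
--     xi = []
--     c = 0
--     for ch in xp:
--         if ch != '-':
--             c += 1
--         xi.append(c)
--     yi = []
--     c = 0
--     for ch in yp:
--         if ch != '-':
--             c += 1
--         yi.append(c)
--     return [(xi[k], yi[k]) for k in range(len(xp))
--             if xp[k] != '-' and yp[k] != '-']
-- ===== Notes on version B (the rewrite author's own statement) =====
-- stated objective: alternative
-- what changed: Replaces the single threaded-counter loop by two prefix-count tables (non-gap counts per column) followed by one filter pass over the columns; the y-coordinate is read from the table instead of a running counter.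
-- intended difference: On alignments that contain a column where both strings have '-' followed by a later column where both are non-gap, A's running j counter also counts the double-gap column and so reports too large a y-position (e.g. ('--A','--A') -> [(1,3)]), while B returns the true 1-based sequence position [(1,1)], which is the intended edge. — e.g. on alignment_edges("--A", "--A"): A returns [(1, 3)], B returns [(1, 1)]
import Mathlib
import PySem

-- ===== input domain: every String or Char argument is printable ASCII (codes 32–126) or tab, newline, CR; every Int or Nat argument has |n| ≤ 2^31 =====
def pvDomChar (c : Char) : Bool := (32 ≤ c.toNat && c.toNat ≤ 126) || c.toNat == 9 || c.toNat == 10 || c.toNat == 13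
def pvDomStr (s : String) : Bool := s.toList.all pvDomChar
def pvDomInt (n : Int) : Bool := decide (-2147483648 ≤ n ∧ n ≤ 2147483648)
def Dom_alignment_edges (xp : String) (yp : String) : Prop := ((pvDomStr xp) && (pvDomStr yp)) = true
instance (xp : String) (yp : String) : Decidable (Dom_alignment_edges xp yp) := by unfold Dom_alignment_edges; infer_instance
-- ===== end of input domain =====

-- B replaces A's threaded i/j counters by prefix-count tables plus one filter pass
-- (objective: alternative decomposition, same O(n) cost); on columns where both
-- strings are '-', A's j counter overcounts later y-positions — stated as D_ below.

-- ===== PORT A =====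
-- xp[k]/yp[k] with k ∈ range(len) are always in range (lengths equal under Pre_),
-- so List.getD is exact here.
def alignment_edges (xp : String) (yp : String) : List (Int × Int) :=
  let xs := xp.toList
  let ys := yp.toList
  let st := (List.range xs.length).foldl
    (fun (st : Int × Int × List (Int × Int)) k =>
      if xs.getD k ' ' ≠ '-' ∧ ys.getD k ' ' ≠ '-' then
        (st.1 + 1, st.2.1 + 1, st.2.2 ++ [(st.1 + 1, st.2.1 + 1)])
      else if xs.getD k ' ' = '-' then
        (st.1, st.2.1 + 1, st.2.2)
      else
        (st.1 + 1, st.2.1, st.2.2))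
    (0, 0, [])
  st.2.2

-- ===== PORT B =====
-- the 'for ch in s: c += …; table.append(c)' loop of Source B
def pvPrefixLoop (c : Int) : List Char → List Int
  | [] => []
  | ch :: rest =>
    (c + if ch ≠ '-' then 1 else 0) :: pvPrefixLoop (c + if ch ≠ '-' then 1 else 0) rest

def alignment_edges_alt (xp : String) (yp : String) : List (Int × Int) :=
  let xs := xp.toList
  let ys := yp.toList
  let xi := pvPrefixLoop 0 xs
  let yi := pvPrefixLoop 0 ys
  (List.range xs.length).filterMap (fun k =>
    if xs.getD k ' ' ≠ '-' ∧ ys.getD k ' ' ≠ '-' then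
      some (xi.getD k 0, yi.getD k 0)
    else none)

-- ===== PRECONDITION & SPEC =====
-- A raises AssertionError iff the strings have different lengths; both ports assume equal lengths.
def Pre_alignment_edges (xp : String) (yp : String) : Prop := xp.length = yp.length
instance (xp : String) (yp : String) : Decidable (Pre_alignment_edges xp yp) := by
  unfold Pre_alignment_edges; infer_instance

def pvWitness_alignment_edges : String × String := ("ACGT", "AC-T")

-- On alignments containing a column where both strings have '-' followed by a later
-- column where both are non-gap, A's running j counter also counts the double-gap
-- column and reports too large a y-position, while B returns the true 1-based
-- sequence position, which is the intended edge.
def D_alignment_edges (xp : String) (yp : String) : Prop :=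
  (((xp.toList.zip yp.toList).dropWhile (fun c => !(c.1 == '-' && c.2 == '-'))).any
    (fun c => c.1 != '-' && c.2 != '-')) = true
instance (xp : String) (yp : String) : Decidable (D_alignment_edges xp yp) := by
  unfold D_alignment_edges; infer_instance

def Spec_alignment_edges (xp : String) (yp : String) (out : List (Int × Int)) : Prop :=
  ¬ D_alignment_edges xp yp → out = alignment_edges_alt xp yp
instance (xp : String) (yp : String) (out : List (Int × Int)) :
    Decidable (Spec_alignment_edges xp yp out) := by
  unfold Spec_alignment_edges; infer_instance

def pvDiffWitness_alignment_edges : String × String := ("--A", "--A")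
def pvDiffWitnessOut_alignment_edges : (List (Int × Int)) × (List (Int × Int)) :=
  ([(1, 3)], [(1, 1)])

-- ===== CLAIM =====
def Claim_unchanged_alignment_edges : Prop :=
  ∀ (xp : String) (yp : String), Dom_alignment_edges xp yp →
    Pre_alignment_edges xp yp → Spec_alignment_edges xp yp (alignment_edges xp yp)
def Claim_changed_alignment_edges : Prop :=
  Dom_alignment_edges (pvDiffWitness_alignment_edges.1) (pvDiffWitness_alignment_edges.2) ∧
  Pre_alignment_edges (pvDiffWitness_alignment_edges.1) (pvDiffWitness_alignment_edges.2) ∧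
  D_alignment_edges (pvDiffWitness_alignment_edges.1) (pvDiffWitness_alignment_edges.2) ∧
  alignment_edges (pvDiffWitness_alignment_edges.1) (pvDiffWitness_alignment_edges.2) = pvDiffWitnessOut_alignment_edges.1 ∧
  alignment_edges_alt (pvDiffWitness_alignment_edges.1) (pvDiffWitness_alignment_edges.2) = pvDiffWitnessOut_alignment_edges.2 ∧
  pvDiffWitnessOut_alignment_edges.1 ≠ pvDiffWitnessOut_alignment_edges.2
def Claim_exact_alignment_edges : Prop :=
  ∀ (xp : String) (yp : String), Dom_alignment_edges xp yp →
    Pre_alignment_edges xp yp → D_alignment_edges xp yp →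
    alignment_edges xp yp ≠ alignment_edges_alt xp yp

-- ===== LEMMAS AND PROOFS =====

-- number of indices i < n with p i
def pvCntP (p : Nat → Bool) : Nat → Int
  | 0 => 0
  | n + 1 => pvCntP p n + (if p n then 1 else 0)

-- the four per-prefix counters, over abstract column functions
def pvCI (f : Nat → Char) (n : Nat) : Int := pvCntP (fun i => decide (f i ≠ '-')) n
def pvCJ (f g : Nat → Char) (n : Nat) : Int :=
  pvCntP (fun i => decide (f i ≠ '-' ∧ g i ≠ '-') || decide (f i = '-')) n
def pvCD (f g : Nat → Char) (n : Nat) : Int :=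
  pvCntP (fun i => decide (f i = '-' ∧ g i = '-')) n

theorem pvCntP_nonneg (p : Nat → Bool) (n : Nat) : 0 ≤ pvCntP p n := by
  induction n with
  | zero => simp [pvCntP]
  | succ n ih => simp only [pvCntP]; split <;> omega

theorem pvCntP_eq_zero (p : Nat → Bool) (n : Nat) (h : ∀ i, i < n → p i = false) :
    pvCntP p n = 0 := by
  induction n with
  | zero => rfl
  | succ n ih =>
    simp only [pvCntP, ih (fun i hi => h i (by omega)), h n (by omega)]
    simp

theorem pvCntP_pos (p : Nat → Bool) (a n : Nat) (ha : a < n) (hp : p a = true) :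
    1 ≤ pvCntP p n := by
  induction n with
  | zero => omega
  | succ n ih =>
    simp only [pvCntP]
    rcases Nat.lt_or_ge a n with h | h
    · have := ih h; split <;> omega
    · have ha' : a = n := by omega
      rw [ha'] at hp
      simp only [hp, if_true]
      have := pvCntP_nonneg p n
      omega

theorem pvCntP_succ_true (p : Nat → Bool) (n : Nat) (h : p n = true) :
    pvCntP p (n + 1) = pvCntP p n + 1 := by
  simp [pvCntP, h]

theorem pvCntP_getD_cons (ch : Char) (rest : List Char) : ∀ k : Nat,
    pvCntP (fun i => decide ((ch :: rest).getD i ' ' ≠ '-')) (k + 1)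
      = (if ch ≠ '-' then 1 else 0) + pvCntP (fun i => decide (rest.getD i ' ' ≠ '-')) k := by
  intro k
  induction k with
  | zero => simp [pvCntP]
  | succ k ih =>
    simp only [pvCntP, List.getD_cons_succ] at ih ⊢
    omega

theorem pvPrefixLoop_getD : ∀ (s : List Char) (c : Int) (k : Nat), k < s.length →
    (pvPrefixLoop c s).getD k 0 = c + pvCntP (fun i => decide (s.getD i ' ' ≠ '-')) (k + 1)
  | [], _, k, hk => by simp at hk
  | ch :: rest, c, 0, _ => by
    simp [pvPrefixLoop, pvCntP]
  | ch :: rest, c, k + 1, hk => by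
    simp only [pvPrefixLoop, List.getD_cons_succ]
    rw [pvPrefixLoop_getD rest _ k (by simpa using hk), pvCntP_getD_cons]
    split <;> omega

-- A's fold, fully characterised over abstract column functions
theorem pvFoldA (f g : Nat → Char) (n : Nat) :
    (List.range n).foldl
      (fun (st : Int × Int × List (Int × Int)) k =>
        if f k ≠ '-' ∧ g k ≠ '-' then
          (st.1 + 1, st.2.1 + 1, st.2.2 ++ [(st.1 + 1, st.2.1 + 1)])
        else if f k = '-' then
          (st.1, st.2.1 + 1, st.2.2)
        else
          (st.1 + 1, st.2.1, st.2.2))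
      (0, 0, []) =
    (pvCI f n, pvCJ f g n,
     ((List.range n).filter (fun k => decide (f k ≠ '-' ∧ g k ≠ '-'))).map
       (fun k => (pvCI f k + 1, pvCJ f g k + 1))) := by
  induction n with
  | zero => rfl
  | succ n ih =>
    rw [List.range_succ, List.foldl_append, ih]
    simp only [List.foldl_cons, List.foldl_nil, List.filter_append, List.map_append,
      List.filter_cons, List.filter_nil, pvCI, pvCJ, pvCntP]
    by_cases hb : f n ≠ '-' ∧ g n ≠ '-'
    · simp [hb]
    · by_cases hx : f n = '-'
      · simp [hx]
      · have hg : g n = '-' := by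
          by_contra h
          exact hb ⟨hx, h⟩
        simp [hx, hg]

theorem alignment_edges_canon (xp yp : String) :
    alignment_edges xp yp =
    ((List.range xp.toList.length).filter
        (fun k => decide (xp.toList.getD k ' ' ≠ '-' ∧ yp.toList.getD k ' ' ≠ '-'))).map
      (fun k => (pvCI (fun i => xp.toList.getD i ' ') k + 1,
                 pvCJ (fun i => xp.toList.getD i ' ') (fun i => yp.toList.getD i ' ') k + 1)) :=
  congrArg (fun t : Int × Int × List (Int × Int) => t.2.2)
    (pvFoldA (fun i => xp.toList.getD i ' ') (fun i => yp.toList.getD i ' ') xp.toList.length)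

theorem filterMap_if_eq_map_filter {α β : Type} (p : α → Prop) [DecidablePred p]
    (h : α → β) (l : List α) :
    l.filterMap (fun k => if p k then some (h k) else none)
      = (l.filter (fun k => decide (p k))).map h := by
  induction l with
  | nil => rfl
  | cons a l ih =>
    simp only [List.filterMap_cons, List.filter_cons]
    by_cases hp : p a <;> simp [hp, ih]

theorem alignment_edges_alt_canon (xp yp : String) (hlen : xp.length = yp.length) :
    alignment_edges_alt xp yp =
    ((List.range xp.toList.length).filter
        (fun k => decide (xp.toList.getD k ' ' ≠ '-' ∧ yp.toList.getD k ' ' ≠ '-'))).map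
      (fun k => (pvCI (fun i => xp.toList.getD i ' ') (k + 1),
                 pvCI (fun i => yp.toList.getD i ' ') (k + 1))) := by
  have h1 := filterMap_if_eq_map_filter
      (fun k => xp.toList.getD k ' ' ≠ '-' ∧ yp.toList.getD k ' ' ≠ '-')
      (fun k => ((pvPrefixLoop 0 xp.toList).getD k 0, (pvPrefixLoop 0 yp.toList).getD k 0))
      (List.range xp.toList.length)
  refine h1.trans (List.map_congr_left ?_)
  intro k hk
  rw [List.mem_filter, List.mem_range] at hk
  have hky : k < yp.toList.length := by
    have e1 : xp.toList.length = xp.length := String.length_toList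
    have e2 : yp.toList.length = yp.length := String.length_toList
    omega
  rw [pvPrefixLoop_getD _ _ _ hk.1, pvPrefixLoop_getD _ _ _ hky]
  simp only [zero_add]
  rfl

-- the j-counter splits: j = (non-gap count of yp) + (double-gap column count)
theorem pvCJ_split (f g : Nat → Char) (n : Nat) :
    pvCJ f g n = pvCI g n + pvCD f g n := by
  induction n with
  | zero => rfl
  | succ n ih =>
    simp only [pvCJ, pvCI, pvCD, pvCntP] at ih ⊢
    by_cases hx : f n = '-' <;> by_cases hy : g n = '-' <;> simp_all <;> omega

theorem pvAnyEdge_iff : ∀ (xs ys : List Char), xs.length = ys.length →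
    ((xs.zip ys).any (fun c => c.1 != '-' && c.2 != '-') = true ↔
      ∃ b, b < xs.length ∧ xs.getD b ' ' ≠ '-' ∧ ys.getD b ' ' ≠ '-')
  | [], [], _ => by simp
  | [], _ :: _, h => by simp at h
  | _ :: _, [], h => by simp at h
  | x :: xs, y :: ys, h => by
    have ih := pvAnyEdge_iff xs ys (by simpa using h)
    simp only [List.zip_cons_cons, List.any_cons, Bool.or_eq_true, Bool.and_eq_true,
      bne_iff_ne, ne_eq, ih]
    constructor
    · rintro (hxy | ⟨b, hb, h1, h2⟩)
      · exact ⟨0, by simp, by simpa using hxy.1, by simpa using hxy.2⟩ 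
      · exact ⟨b + 1, by simp only [List.length_cons]; omega,
          by simpa using h1, by simpa using h2⟩
    · rintro ⟨b, hb, h1, h2⟩
      cases b with
      | zero => exact Or.inl ⟨by simpa using h1, by simpa using h2⟩
      | succ b =>
        exact Or.inr ⟨b, by simp only [List.length_cons] at hb; omega,
          by simpa using h1, by simpa using h2⟩

theorem pvHasDblThenEdge_iff : ∀ (xs ys : List Char), xs.length = ys.length →
    ((((xs.zip ys).dropWhile (fun c => !(c.1 == '-' && c.2 == '-'))).any
        (fun c => c.1 != '-' && c.2 != '-')) = true ↔
      ∃ a b, a < b ∧ b < xs.length ∧ xs.getD a ' ' = '-' ∧ ys.getD a ' ' = '-' ∧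
        xs.getD b ' ' ≠ '-' ∧ ys.getD b ' ' ≠ '-')
  | [], [], _ => by simp
  | [], _ :: _, h => by simp at h
  | _ :: _, [], h => by simp at h
  | x :: xs, y :: ys, h => by
    have hlen : xs.length = ys.length := by simpa using h
    by_cases hd : x = '-' ∧ y = '-'
    · rw [show (((x :: xs).zip (y :: ys)).dropWhile (fun c => !(c.1 == '-' && c.2 == '-')))
            = (x, y) :: (xs.zip ys) by
        simp [List.zip_cons_cons, List.dropWhile_cons, hd.1, hd.2]]
      rw [show ((((x, y) :: (xs.zip ys)).any (fun c => c.1 != '-' && c.2 != '-')) = true)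
            = ((xs.zip ys).any (fun c => c.1 != '-' && c.2 != '-') = true) by
        simp [List.any_cons, hd.1]]
      rw [pvAnyEdge_iff xs ys hlen]
      constructor
      · rintro ⟨b, hb, h1, h2⟩
        exact ⟨0, b + 1, by omega, by simp only [List.length_cons]; omega,
          by simpa using hd.1, by simpa using hd.2, by simpa using h1, by simpa using h2⟩
      · rintro ⟨a, b, hab, hb, _, _, h1, h2⟩
        cases b with
        | zero => omega
        | succ b =>
          exact ⟨b, by simp only [List.length_cons] at hb; omega,
            by simpa using h1, by simpa using h2⟩
    · rw [show (((x :: xs).zip (y :: ys)).dropWhile (fun c => !(c.1 == '-' && c.2 == '-')))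
            = ((xs.zip ys).dropWhile (fun c => !(c.1 == '-' && c.2 == '-'))) by
        rcases Classical.em (x = '-') with hx | hx
        · have hy : ¬ y = '-' := fun hy => hd ⟨hx, hy⟩
          simp [List.zip_cons_cons, List.dropWhile_cons, hx, hy]
        · simp [List.zip_cons_cons, List.dropWhile_cons, hx]]
      rw [pvHasDblThenEdge_iff xs ys hlen]
      constructor
      · rintro ⟨a, b, hab, hb, h1, h2, h3, h4⟩
        exact ⟨a + 1, b + 1, by omega, by simp only [List.length_cons]; omega,
          by simpa using h1, by simpa using h2, by simpa using h3, by simpa using h4⟩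
      · rintro ⟨a, b, hab, hb, h1, h2, h3, h4⟩
        cases a with
        | zero =>
          exact absurd ⟨by simpa using h1, by simpa using h2⟩ hd
        | succ a =>
          cases b with
          | zero => omega
          | succ b =>
            exact ⟨a, b, by omega, by simp only [List.length_cons] at hb; omega,
              by simpa using h1, by simpa using h2, by simpa using h3, by simpa using h4⟩

-- ===== VERDICT =====
theorem alignment_edges_spec : Claim_unchanged_alignment_edges := by
  intro xp yp _ hpre hnd
  have hlen : xp.toList.length = yp.toList.length := by
    have e0 : xp.length = yp.length := hpre
    have e1 : xp.toList.length = xp.length := String.length_toList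
    have e2 : yp.toList.length = yp.length := String.length_toList
    omega
  rw [alignment_edges_canon, alignment_edges_alt_canon xp yp hpre]
  apply List.map_congr_left
  intro k hk
  rw [List.mem_filter, List.mem_range] at hk
  have hcond := of_decide_eq_true hk.2
  have hdbl : pvCD (fun i => xp.toList.getD i ' ') (fun i => yp.toList.getD i ' ') k = 0 := by
    apply pvCntP_eq_zero
    intro i hi
    simp only [decide_eq_false_iff_not]
    intro ⟨hxi, hyi⟩
    exact hnd ((pvHasDblThenEdge_iff _ _ hlen).mpr
      ⟨i, k, by omega, hk.1, hxi, hyi, hcond.1, hcond.2⟩)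
  have hx : pvCI (fun i => xp.toList.getD i ' ') (k + 1)
      = pvCI (fun i => xp.toList.getD i ' ') k + 1 :=
    pvCntP_succ_true _ k (decide_eq_true hcond.1)
  have hy : pvCI (fun i => yp.toList.getD i ' ') (k + 1)
      = pvCI (fun i => yp.toList.getD i ' ') k + 1 :=
    pvCntP_succ_true _ k (decide_eq_true hcond.2)
  rw [pvCJ_split, hdbl, hx, hy]
  simp

theorem alignment_edges_changed : Claim_changed_alignment_edges := by
  unfold Claim_changed_alignment_edges; decide

theorem alignment_edges_tight : Claim_exact_alignment_edges := by
  intro xp yp _ hpre hd heq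
  have hlen : xp.toList.length = yp.toList.length := by
    have e0 : xp.length = yp.length := hpre
    have e1 : xp.toList.length = xp.length := String.length_toList
    have e2 : yp.toList.length = yp.length := String.length_toList
    omega
  obtain ⟨a, b, hab, hb, hxa, hya, hxb, hyb⟩ := (pvHasDblThenEdge_iff _ _ hlen).mp hd
  rw [alignment_edges_canon, alignment_edges_alt_canon xp yp hpre] at heq
  have hbmem : b ∈ (List.range xp.toList.length).filter
      (fun k => decide (xp.toList.getD k ' ' ≠ '-' ∧ yp.toList.getD k ' ' ≠ '-')) :=
    List.mem_filter.mpr ⟨List.mem_range.mpr hb, decide_eq_true ⟨hxb, hyb⟩⟩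
  have hpt := (List.map_inj_left.mp heq) b hbmem
  have hsnd := congrArg Prod.snd hpt
  simp only at hsnd
  rw [pvCJ_split] at hsnd
  have hy : pvCI (fun i => yp.toList.getD i ' ') (b + 1)
      = pvCI (fun i => yp.toList.getD i ' ') b + 1 :=
    pvCntP_succ_true _ b (decide_eq_true hyb)
  rw [hy] at hsnd
  have hpos : 1 ≤ pvCD (fun i => xp.toList.getD i ' ') (fun i => yp.toList.getD i ' ') b :=
    pvCntP_pos _ a b hab (decide_eq_true ⟨hxa, hya⟩)
  omega
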